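-- pv_equiv track=rewrite | github.com/SimeonChifligarov/Python_Basics | Advanced_Solutions/04_01_For_Loop_Lab/06_Vowels_Sum.py | calculate_vowel_value_sum
-- ===== SOURCE A (Python) =====
-- def calculate_vowel_value_sum(input_text: str) -> int:
--     """
--     Calculates the sum of values of vowels in the input text based on predefined values.
--
--     Args:
--         input_text: the string to evaluate
--
--     Returns:
--         The total value of all vowels in the string
--     """
--     if not input_text:
--         return 0
--
--     vowel_values: dict[str, int] = {
--         'a': 1,
--         'e': 2,
--         'i': 3,
--         'o': 4,
--         'u': 5,
--     }
--
--     total: int = sum([vowel_values[char] for char in input_text if char in vowel_values])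
--     return total
-- ===== SOURCE B (Python) =====
-- VOWEL_TABLE = (('a', 1), ('e', 2), ('i', 3), ('o', 4), ('u', 5))
--
--
-- def calculate_vowel_value_sum(input_text: str) -> int:
--     return sum(input_text.count(vowel) * value for vowel, value in VOWEL_TABLE)
-- ===== Notes on version B (the rewrite author's own statement) =====
-- stated objective: idiomatic
-- what changed: Replaces the per-character filtered dict-lookup pass (building an intermediate list and summing it) with five C-level str.count scans, one per vowel/value table entry, multiplied by the value and summed; the empty-string guard disappears.
import Mathlib
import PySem

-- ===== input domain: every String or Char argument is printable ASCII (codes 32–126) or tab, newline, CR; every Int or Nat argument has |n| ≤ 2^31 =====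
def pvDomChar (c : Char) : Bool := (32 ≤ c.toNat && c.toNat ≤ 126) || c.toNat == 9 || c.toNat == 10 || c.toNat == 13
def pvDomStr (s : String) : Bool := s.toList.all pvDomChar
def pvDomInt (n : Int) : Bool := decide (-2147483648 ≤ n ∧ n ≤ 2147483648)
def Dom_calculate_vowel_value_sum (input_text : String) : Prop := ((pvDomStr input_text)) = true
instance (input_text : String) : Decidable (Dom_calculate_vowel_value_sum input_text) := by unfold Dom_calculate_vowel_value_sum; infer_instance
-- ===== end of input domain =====

-- B sums value * str.count per vowel-table entry (idiomatic table scan) instead of A's filtered per-character dict-lookup pass.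
-- ===== PORT A =====
def calculate_vowel_value_sum (input_text : String) : Int :=
  if input_text.toList.isEmpty then 0
  else
    let vowel_values : PySem.Dict Char Int :=
      ((((PySem.Dict.empty.insert 'a' 1).insert 'e' 2).insert 'i' 3).insert 'o' 4).insert 'u' 5
    ((input_text.toList.filter (fun char => vowel_values.contains char)).map
      (fun char => vowel_values.getD char 0)).sum

-- ===== PORT B =====
def pvVowelTable : List (Char × Int) := [('a', 1), ('e', 2), ('i', 3), ('o', 4), ('u', 5)]

def calculate_vowel_value_sum_alt (input_text : String) : Int :=
  (pvVowelTable.map (fun p => (PySem.Str.count input_text (String.ofList [p.1]) : Int) * p.2)).sum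

-- ===== PRECONDITION & SPEC =====
def Spec_calculate_vowel_value_sum (input_text : String) (out : Int) : Prop := out = calculate_vowel_value_sum_alt input_text
instance (input_text : String) (out : Int) : Decidable (Spec_calculate_vowel_value_sum input_text out) := by unfold Spec_calculate_vowel_value_sum; infer_instance

-- ===== CLAIM (what is proved, stated in full; the proofs are below) =====
def Claim_equal_calculate_vowel_value_sum : Prop := ∀ (input_text : String), Dom_calculate_vowel_value_sum input_text → Spec_calculate_vowel_value_sum input_text (calculate_vowel_value_sum input_text)

-- ===== LEMMAS AND PROOFS =====


-- single-character substring count: Chars.count.go counts occurrences of that character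
lemma count_go_single (c : Char) : ∀ (l : List Char) (fuel acc : Nat), l.length ≤ fuel →
    PySem.Chars.count.go [c] fuel l acc = acc + l.count c := by
  intro l
  induction l with
  | nil => intro fuel acc _; cases fuel <;> simp [PySem.Chars.count.go]
  | cons h t ih =>
    intro fuel acc hf
    cases fuel with
    | zero => simp at hf
    | succ n =>
      simp only [List.length_cons, Nat.succ_le_succ_iff] at hf
      by_cases hc : h = c
      · subst hc
        rw [show PySem.Chars.count.go [h] (n+1) (h::t) acc = PySem.Chars.count.go [h] n t (acc+1) from by
              simp [PySem.Chars.count.go, List.isPrefixOf]]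
        rw [ih n (acc+1) hf]
        simp [List.count_cons]
        omega
      · have hp : ([c].isPrefixOf (h :: t)) = false := by
          simp [List.isPrefixOf]; exact fun h' => absurd h'.symm hc
        rw [show PySem.Chars.count.go [c] (n+1) (h::t) acc = PySem.Chars.count.go [c] n t acc from by
              simp [PySem.Chars.count.go, hp]]
        rw [ih n acc hf]
        simp [List.count_cons, beq_eq_false_iff_ne.mpr hc]

lemma count_single (cs : List Char) (c : Char) :
    PySem.Chars.count cs [c] = cs.count c := by
  simp [PySem.Chars.count, count_go_single c cs cs.length 0 le_rfl]

lemma a_sum (cs : List Char) :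
    ((cs.filter (fun char =>
        (((((PySem.Dict.empty.insert 'a' (1:Int)).insert 'e' 2).insert 'i' 3).insert 'o' 4).insert 'u' 5).contains char)).map
      (fun char =>
        (((((PySem.Dict.empty.insert 'a' (1:Int)).insert 'e' 2).insert 'i' 3).insert 'o' 4).insert 'u' 5).getD char 0)).sum
    = 1 * (cs.count 'a' : Int) + 2 * cs.count 'e' + 3 * cs.count 'i' + 4 * cs.count 'o' + 5 * cs.count 'u' := by
  induction cs with
  | nil => simp
  | cons h t ih =>
    by_cases ha : h = 'a'
    · subst ha
      rw [List.filter_cons, if_pos (by decide), List.map_cons, List.sum_cons,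
        show ((((((PySem.Dict.empty.insert 'a' (1:Int)).insert 'e' 2).insert 'i' 3).insert 'o' 4).insert 'u' 5).getD 'a' 0) = 1 from rfl, ih]
      simp [List.count_cons]; ring
    · by_cases he : h = 'e'
      · subst he
        rw [List.filter_cons, if_pos (by decide), List.map_cons, List.sum_cons,
          show ((((((PySem.Dict.empty.insert 'a' (1:Int)).insert 'e' 2).insert 'i' 3).insert 'o' 4).insert 'u' 5).getD 'e' 0) = 2 from rfl, ih]
        simp [List.count_cons]; ring
      · by_cases hi : h = 'i'
        · subst hi
          rw [List.filter_cons, if_pos (by decide), List.map_cons, List.sum_cons,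
            show ((((((PySem.Dict.empty.insert 'a' (1:Int)).insert 'e' 2).insert 'i' 3).insert 'o' 4).insert 'u' 5).getD 'i' 0) = 3 from rfl, ih]
          simp [List.count_cons]; ring
        · by_cases ho : h = 'o'
          · subst ho
            rw [List.filter_cons, if_pos (by decide), List.map_cons, List.sum_cons,
              show ((((((PySem.Dict.empty.insert 'a' (1:Int)).insert 'e' 2).insert 'i' 3).insert 'o' 4).insert 'u' 5).getD 'o' 0) = 4 from rfl, ih]
            simp [List.count_cons]; ring
          · by_cases hu : h = 'u'
            · subst hu
              rw [List.filter_cons, if_pos (by decide), List.map_cons, List.sum_cons,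
                show ((((((PySem.Dict.empty.insert 'a' (1:Int)).insert 'e' 2).insert 'i' 3).insert 'o' 4).insert 'u' 5).getD 'u' 0) = 5 from rfl, ih]
              simp [List.count_cons]; ring
            · have hcont : ((((((PySem.Dict.empty.insert 'a' (1:Int)).insert 'e' 2).insert 'i' 3).insert 'o' 4).insert 'u' 5).contains h) = false := by
                rw [show (((((PySem.Dict.empty.insert 'a' (1:Int)).insert 'e' 2).insert 'i' 3).insert 'o' 4).insert 'u' 5)
                      = (⟨[('a',1),('e',2),('i',3),('o',4),('u',5)]⟩ : PySem.Dict Char Int) from rfl]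
                simp only [PySem.Dict.contains, List.any_cons, List.any_nil,
                  beq_eq_false_iff_ne.mpr (fun x => ha x.symm), beq_eq_false_iff_ne.mpr (fun x => he x.symm),
                  beq_eq_false_iff_ne.mpr (fun x => hi x.symm), beq_eq_false_iff_ne.mpr (fun x => ho x.symm),
                  beq_eq_false_iff_ne.mpr (fun x => hu x.symm), Bool.or_self, Bool.or_false]
              have ha2 : (h == 'a') = false := beq_eq_false_iff_ne.mpr ha
              have he2 : (h == 'e') = false := beq_eq_false_iff_ne.mpr he
              have hi2 : (h == 'i') = false := beq_eq_false_iff_ne.mpr hi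
              have ho2 : (h == 'o') = false := beq_eq_false_iff_ne.mpr ho
              have hu2 : (h == 'u') = false := beq_eq_false_iff_ne.mpr hu
              simp only [List.filter_cons, hcont, Bool.false_eq_true, if_false,
                List.count_cons, ha2, he2, hi2, ho2, hu2, if_false, add_zero]
              exact ih

-- ===== VERDICT (by name: the statement is the Claim_ definition above) =====
theorem calculate_vowel_value_sum_spec : Claim_equal_calculate_vowel_value_sum := by
  intro s _
  unfold Spec_calculate_vowel_value_sum calculate_vowel_value_sum calculate_vowel_value_sum_alt pvVowelTable
  by_cases h : s.toList.isEmpty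
  · rw [List.isEmpty_iff] at h
    simp [h, PySem.Str.count_eq, count_single]
  · simp only [h, if_false]
    simp only [PySem.Str.count_eq, List.map_cons, List.map_nil, List.sum_cons, List.sum_nil]
    rw [a_sum]
    simp [String.toList_ofList, count_single]
    ring
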